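-- pv_equiv track=rewrite | github.com/YooGunWook/coding_test | 스택/기능개발.py | solution
-- ===== SOURCE A (Python) =====
-- import collections
--
-- def solution(progresses, speeds):
--     queue = collections.deque()
--     for progress, speed in zip(progresses, speeds):
--         count = 0
--         while progress < 100:
--             if progress >= 100:
--                 break
--             progress += speed
--             count += 1
--         queue.append(count)
--
--     for qu in range(1, len(queue)):
--         if queue[qu] <= queue[qu - 1]:
--             queue[qu] = queue[qu - 1]
--
--     return list(collections.Counter(queue).values())
-- ===== SOURCE B (Python) =====
-- def solution(progresses, speeds):
--     batches = []
--     cur = None  # (leader day of current batch, size of current batch)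
--     for p, s in zip(progresses, speeds):
--         d = 0 if p >= 100 else -((p - 100) // s)  # days until this feature is done
--         if cur is None:
--             cur = (d, 1)
--         elif d <= cur[0]:
--             cur = (cur[0], cur[1] + 1)
--         else:
--             batches.append(cur[1])
--             cur = (d, 1)
--     if cur is not None:
--         batches.append(cur[1])
--     return batches
-- ===== Notes on version B (the rewrite author's own statement) =====
-- stated objective: simpler
-- what changed: Replaces the per-feature while loop by a closed-form ceiling division and replaces the mutate-into-monotone-array-then-Counter pipeline by a single forward pass that keeps the current batch's leader day and count; Pre_ only excludes inputs with a zipped pair having progress < 100 and speed <= 0, on which A loops forever (and raises ZeroDivisionError in B for speed 0).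
import Mathlib
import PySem

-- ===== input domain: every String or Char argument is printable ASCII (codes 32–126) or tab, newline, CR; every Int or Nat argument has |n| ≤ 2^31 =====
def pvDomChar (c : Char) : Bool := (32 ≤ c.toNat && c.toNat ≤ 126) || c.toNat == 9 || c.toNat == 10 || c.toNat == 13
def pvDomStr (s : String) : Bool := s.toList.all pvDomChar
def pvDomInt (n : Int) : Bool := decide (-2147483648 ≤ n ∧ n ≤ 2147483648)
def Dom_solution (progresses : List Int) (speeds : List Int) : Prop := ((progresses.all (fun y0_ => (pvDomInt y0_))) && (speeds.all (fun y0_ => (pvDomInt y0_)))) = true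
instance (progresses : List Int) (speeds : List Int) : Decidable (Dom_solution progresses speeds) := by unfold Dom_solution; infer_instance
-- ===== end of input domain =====

-- B replaces A's per-feature counting loop by a closed-form ceiling division and A's
-- mutate-then-Counter pipeline by one forward pass keeping the current batch's leader and size.

-- ===== PORT A =====
-- the 'while progress < 100' loop; fuel (100 - progress).toNat suffices whenever the
-- Python loop terminates (speed ≥ 1, guaranteed by Pre_solution); the inner
-- 'if progress >= 100: break' is kept as the first test of the body.
def daysLoopA (speed : Int) : Int → Int → Nat → Int
  | _, count, 0 => count
  | progress, count, fuel + 1 =>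
    if progress < 100 then
      if 100 ≤ progress then count
      else daysLoopA speed (progress + speed) (count + 1) fuel
    else count

def daysA (progress speed : Int) : Int :=
  daysLoopA speed progress 0 (100 - progress).toNat

-- body of 'for qu in range(1, len(queue)): if queue[qu] <= queue[qu-1]: queue[qu] = queue[qu-1]'
def stepFixA (q : List Int) (i : Int) : List Int :=
  if PySem.List.pyGetD q i 0 ≤ PySem.List.pyGetD q (i - 1) 0 then
    q.set i.toNat (PySem.List.pyGetD q (i - 1) 0)
  else q

def solution (progresses : List Int) (speeds : List Int) : List Int :=
  let queue := (progresses.zip speeds).foldl (fun q pr => q ++ [daysA pr.1 pr.2]) []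
  let queue2 := (PySem.List.pyRange 1 (queue.length : Int) 1).foldl stepFixA queue
  (PySem.Dict.counter queue2).values

-- ===== PORT B =====
-- d = 0 if p >= 100 else -((p - 100) // s)
def dayB (p s : Int) : Int := if 100 ≤ p then 0 else -(PySem.Int.floordiv (p - 100) s)

-- loop body after d is computed: state = (batches, cur) with cur = none | some (leader, count)
def stepD (st : List Int × Option (Int × Int)) (d : Int) : List Int × Option (Int × Int) :=
  match st.2 with
  | none => (st.1, some (d, 1))
  | some lc => if d ≤ lc.1 then (st.1, some (lc.1, lc.2 + 1)) else (st.1 ++ [lc.2], some (d, 1))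

def solution_alt (progresses : List Int) (speeds : List Int) : List Int :=
  let st := (progresses.zip speeds).foldl (fun st pr => stepD st (dayB pr.1 pr.2)) ([], none)
  match st.2 with
  | none => st.1
  | some lc => st.1 ++ [lc.2]

-- ===== PRECONDITION & SPEC =====
-- Pre_ excludes exactly the inputs where some zipped pair has progress < 100 and speed ≤ 0:
-- there A's while loop never terminates (A returns on no such input; B would divide by 0 or
-- miscount, both outside any sensible domain of the task).
def Pre_solution (progresses : List Int) (speeds : List Int) : Prop :=
  ∀ pr ∈ progresses.zip speeds, 100 ≤ pr.1 ∨ 1 ≤ pr.2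
instance (progresses : List Int) (speeds : List Int) : Decidable (Pre_solution progresses speeds) := by
  unfold Pre_solution; infer_instance

def pvWitness_solution : List Int × List Int := ([93, 30, 55, 60, 95], [1, 30, 5, 40, 10])

def Spec_solution (progresses : List Int) (speeds : List Int) (out : List Int) : Prop :=
  out = solution_alt progresses speeds
instance (progresses : List Int) (speeds : List Int) (out : List Int) : Decidable (Spec_solution progresses speeds out) := by
  unfold Spec_solution; infer_instance

-- ===== CLAIM (what is proved, stated in full; the proofs are below) =====
def Claim_equal_solution : Prop := ∀ (progresses : List Int) (speeds : List Int), Dom_solution progresses speeds → Pre_solution progresses speeds → Spec_solution progresses speeds (solution progresses speeds)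

-- ===== LEMMAS AND PROOFS =====

-- closed-form day count peels one loop iteration
lemma dayB_step (p s : Int) (hp : p < 100) (hs : 1 ≤ s) : dayB p s = 1 + dayB (p + s) s := by
  unfold dayB
  by_cases h2 : 100 ≤ p + s
  · have h1 : PySem.Int.floordiv (p - 100) s = -1 := by
      rw [PySem.Int.floordiv_eq_iff_of_pos (by omega : (0:Int) < s)]
      constructor <;> nlinarith
    rw [if_neg (by omega), if_pos h2, h1]; norm_num
  · have key : PySem.Int.floordiv (p - 100) s = PySem.Int.floordiv (p + s - 100) s - 1 := by
      rw [PySem.Int.floordiv_eq_ediv_of_pos (by omega : (0:Int) < s),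
          PySem.Int.floordiv_eq_ediv_of_pos (by omega : (0:Int) < s)]
      have h3 : p + s - 100 = (p - 100) + 1 * s := by ring
      rw [h3, Int.add_mul_ediv_right _ _ (by omega : s ≠ 0)]; ring
    rw [if_neg (by omega), if_neg (by omega), key]; ring

lemma daysLoopA_eq (s : Int) (hs : 1 ≤ s) :
    ∀ (fuel : Nat) (p c : Int), (100 - p).toNat ≤ fuel → daysLoopA s p c fuel = c + dayB p s := by
  intro fuel
  induction fuel with
  | zero =>
    intro p c h
    have hp : 100 ≤ p := by omega
    simp [daysLoopA, dayB, hp]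
  | succ fuel ih =>
    intro p c h
    by_cases hp : p < 100
    · rw [daysLoopA, if_pos hp, if_neg (by omega)]
      rw [ih (p + s) (c + 1) (by omega), dayB_step p s hp hs]
      ring
    · rw [daysLoopA, if_neg hp]
      have hp' : 100 ≤ p := by omega
      simp [dayB, hp']

lemma daysA_eq (p s : Int) (h : 100 ≤ p ∨ 1 ≤ s) : daysA p s = dayB p s := by
  by_cases hs : 1 ≤ s
  · have := daysLoopA_eq s hs (100 - p).toNat p 0 le_rfl
    unfold daysA; omega
  · have hp : 100 ≤ p := by tauto
    have hz : (100 - p).toNat = 0 := by omega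
    unfold daysA
    rw [hz]
    simp [daysLoopA, dayB, hp]

-- the monotone fix-up A performs in place, as a pure function
def fixup (m : Int) : List Int → List Int
  | [] => []
  | x :: t => max m x :: fixup (max m x) t

lemma fixfold (rest : List Int) :
    ∀ (done : List Int) (m : Int),
      (PySem.List.pyRange ((done.length : Int) + 1) ((done.length : Int) + 1 + (rest.length : Int)) 1).foldl
          stepFixA (done ++ m :: rest)
        = done ++ m :: fixup m rest := by
  induction rest with
  | nil =>
    intro done m
    rw [PySem.List.pyRange_one_eq_nil (by simp)]
    rfl
  | cons x t ih =>
    intro done m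
    have hab : (done.length : Int) + 1 < (done.length : Int) + 1 + ((x :: t).length : Int) := by
      simp only [List.length_cons]; push_cast; omega
    rw [PySem.List.pyRange_one_cons hab, List.foldl_cons]
    have hidx : ((done.length : Int) + 1) = ((done.length + 1 : Nat) : Int) := by simp
    have hidx' : ((done.length : Int) + 1 - 1) = ((done.length : Nat) : Int) := by ring
    have hget1 : PySem.List.pyGetD (done ++ m :: x :: t) ((done.length : Int) + 1) 0 = x := by
      rw [hidx, PySem.List.pyGetD_natCast,
          List.getD_append_right _ _ _ _ (by omega)]
      simp
    have hget0 : PySem.List.pyGetD (done ++ m :: x :: t) ((done.length : Int) + 1 - 1) 0 = m := by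
      rw [hidx', PySem.List.pyGetD_natCast,
          List.getD_append_right _ _ _ _ (by omega)]
      simp
    have hstep : stepFixA (done ++ m :: x :: t) ((done.length : Int) + 1)
        = done ++ m :: max m x :: t := by
      unfold stepFixA
      rw [hget1, hget0]
      by_cases hxm : x ≤ m
      · rw [if_pos hxm]
        have htn : ((done.length : Int) + 1).toNat = done.length + 1 := by omega
        rw [htn, List.set_append, if_neg (by omega)]
        have : done.length + 1 - done.length = 1 := by omega
        rw [this]
        simp [max_eq_left hxm]
      · rw [if_neg hxm]
        simp [max_eq_right (le_of_not_ge hxm)]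
    rw [hstep]
    have hre : done ++ m :: max m x :: t = (done ++ [m]) ++ max m x :: t := by simp
    have hr1 : (done.length : Int) + 1 + 1 = (((done ++ [m]).length : Int)) + 1 := by
      simp
    have hr2 : (done.length : Int) + 1 + ((x :: t).length : Int)
        = (((done ++ [m]).length : Int)) + 1 + (t.length : Int) := by
      simp; ring
    rw [hre, hr1, hr2, ih (done ++ [m]) (max m x)]
    simp [fixup]

-- run-length sizes of a grouped list / batch sizes over the raw day list
def rleAux : Int → Int → List Int → List Int
  | _, c, [] => [c]
  | x, c, y :: t => if y = x then rleAux x (c + 1) t else c :: rleAux y 1 t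

def grp : Int → Int → List Int → List Int
  | _, c, [] => [c]
  | l, c, x :: t => if x ≤ l then grp l (c + 1) t else c :: grp x 1 t

lemma le_fixup : ∀ (t : List Int) (m b : Int), b ∈ fixup m t → m ≤ b := by
  intro t
  induction t with
  | nil => intro m b h; simp [fixup] at h
  | cons x t ih =>
    intro m b h
    rcases List.mem_cons.mp h with h1 | h1
    · subst h1; exact le_max_left _ _
    · exact le_trans (le_max_left _ _) (ih (max m x) b h1)

lemma pairwise_fixup : ∀ (t : List Int) (m : Int), List.Pairwise (· ≤ ·) (m :: fixup m t) := by
  intro t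
  induction t with
  | nil => simp [fixup]
  | cons x t ih =>
    intro m
    rw [fixup]
    refine List.pairwise_cons.mpr ⟨?_, ih (max m x)⟩
    intro b hb
    rcases List.mem_cons.mp hb with h1 | h1
    · subst h1; exact le_max_left _ _
    · exact le_trans (le_max_left _ _) (le_fixup t (max m x) b h1)

lemma rle_fixup : ∀ (t : List Int) (x c : Int), rleAux x c (fixup x t) = grp x c t := by
  intro t
  induction t with
  | nil => intro x c; simp [fixup, rleAux, grp]
  | cons y t ih =>
    intro x c
    by_cases hy : y ≤ x
    · rw [fixup, max_eq_left hy, rleAux, if_pos rfl, ih, grp, if_pos hy]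
    · rw [fixup, max_eq_right (le_of_not_ge hy), rleAux, if_neg (by omega), ih, grp, if_neg hy]

-- PySem.Set.ofList structure lemmas
lemma foldl_add_cons (l : List Int) :
    ∀ (s : List Int) (x : Int), x ∉ l →
      List.foldl PySem.Set.add (x :: s) l = x :: List.foldl PySem.Set.add s l := by
  induction l with
  | nil => intro s x _; rfl
  | cons y t ih =>
    intro s x hx
    have hxy : x ≠ y := fun h => hx (h ▸ List.mem_cons_self)
    have hxt : x ∉ t := fun h => hx (List.mem_cons_of_mem _ h)
    by_cases hy : y ∈ s
    · rw [List.foldl_cons, List.foldl_cons,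
        show PySem.Set.add (x :: s) y = x :: s by
          simp [PySem.Set.add, List.mem_cons, hy],
        show PySem.Set.add s y = s by simp [PySem.Set.add, hy]]
      exact ih s x hxt
    · rw [List.foldl_cons, List.foldl_cons,
        show PySem.Set.add (x :: s) y = x :: (s ++ [y]) by
          simp [PySem.Set.add, List.mem_cons, hy, Ne.symm hxy],
        show PySem.Set.add s y = s ++ [y] by simp [PySem.Set.add, hy]]
      exact ih (s ++ [y]) x hxt

lemma ofList_cons_notmem (x : Int) (l : List Int) (h : x ∉ l) :
    PySem.Set.ofList (x :: l) = x :: PySem.Set.ofList l := by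
  unfold PySem.Set.ofList
  rw [List.foldl_cons,
    show PySem.Set.add PySem.Set.empty x = [x] by simp [PySem.Set.add, PySem.Set.empty]]
  exact foldl_add_cons l [] x h

lemma ofList_cons_dup (x : Int) (l : List Int) :
    PySem.Set.ofList (x :: x :: l) = PySem.Set.ofList (x :: l) := by
  unfold PySem.Set.ofList
  rw [List.foldl_cons, List.foldl_cons, List.foldl_cons,
    show PySem.Set.add (PySem.Set.add PySem.Set.empty x) x = PySem.Set.add PySem.Set.empty x by
      simp [PySem.Set.add, PySem.Set.empty]]

-- Counter's value list over a nondecreasing list is its run-length encoding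
lemma countmap : ∀ (r : List Int) (x c : Int), List.Pairwise (· ≤ ·) (x :: r) →
    List.map (fun k => (((x :: r).count k : Int) + if k = x then c else 0)) (PySem.Set.ofList (x :: r))
      = rleAux x (c + 1) r := by
  intro r
  induction r with
  | nil =>
    intro x c _
    rw [ofList_cons_notmem x [] (List.not_mem_nil)]
    simp [rleAux]
    ring
  | cons y r' ih =>
    intro x c h
    have h1 := List.pairwise_cons.mp h
    by_cases hxy : y = x
    · subst hxy
      rw [ofList_cons_dup]
      have hmapeq :
          List.map (fun k => (((y :: y :: r').count k : Int) + if k = y then c else 0))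
              (PySem.Set.ofList (y :: r'))
            = List.map (fun k => (((y :: r').count k : Int) + if k = y then c + 1 else 0))
              (PySem.Set.ofList (y :: r')) := by
        apply List.map_congr_left
        intro k _
        by_cases hk : k = y
        · subst hk
          simp
          ring
        · simp [hk, Ne.symm hk]
      rw [hmapeq, ih y (c + 1) h1.2, rleAux, if_pos rfl]
    · have hxlty : x < y := lt_of_le_of_ne (h1.1 y List.mem_cons_self) (Ne.symm hxy)
      have hnotin : x ∉ y :: r' := by
        intro hm
        rcases List.mem_cons.mp hm with h2 | h2
        · exact hxy (Eq.symm h2)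
        · have := (List.pairwise_cons.mp h1.2).1 x h2
          omega
      rw [ofList_cons_notmem x (y :: r') hnotin, List.map_cons]
      have hhead : (((x :: y :: r').count x : Int) + if x = x then c else 0) = c + 1 := by
        have hz : (y :: r').count x = 0 := List.count_eq_zero.mpr hnotin
        simp [hz]
        ring
      have htail :
          List.map (fun k => (((x :: y :: r').count k : Int) + if k = x then c else 0))
              (PySem.Set.ofList (y :: r'))
            = List.map (fun k => (((y :: r').count k : Int) + if k = y then (0:Int) else 0))
              (PySem.Set.ofList (y :: r')) := by
        apply List.map_congr_left
        intro k hk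
        have hkmem : k ∈ y :: r' := (PySem.Set.mem_ofList _ _).mp hk
        have hkx : k ≠ x := fun h2 => hnotin (h2 ▸ hkmem)
        simp [List.count_cons, hkx, Ne.symm hkx]
      rw [hhead, htail, ih y 0 h1.2, rleAux, if_neg hxy]
      norm_num

-- B's fold produces the batch sizes
lemma foldD_some : ∀ (t : List Int) (bs : List Int) (l c : Int),
    (match (t.foldl stepD (bs, some (l, c))).2 with
      | none => (t.foldl stepD (bs, some (l, c))).1
      | some lc => (t.foldl stepD (bs, some (l, c))).1 ++ [lc.2])
    = bs ++ grp l c t := by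
  intro t
  induction t with
  | nil => intro bs l c; simp [grp]
  | cons d t ih =>
    intro bs l c
    rw [List.foldl_cons]
    by_cases hd : d ≤ l
    · rw [show stepD (bs, some (l, c)) d = (bs, some (l, c + 1)) by simp [stepD, hd]]
      rw [ih, grp, if_pos hd]
    · rw [show stepD (bs, some (l, c)) d = (bs ++ [c], some (d, 1)) by simp [stepD, hd]]
      rw [ih, grp, if_neg hd]
      simp

-- ===== VERDICT (by name: the statement is the Claim_ definition above) =====
theorem solution_spec : Claim_equal_solution := by
  intro progresses speeds _ hpre
  unfold Spec_solution
  simp only [solution, solution_alt]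
  have hmap : (progresses.zip speeds).foldl (fun q pr => q ++ [daysA pr.1 pr.2]) []
      = (progresses.zip speeds).map (fun pr => dayB pr.1 pr.2) := by
    rw [PySem.List.foldl_append_singleton_eq_map (fun pr : Int × Int => daysA pr.1 pr.2)]
    simp only [List.nil_append]
    exact List.map_congr_left (fun pr hpr => daysA_eq pr.1 pr.2 (hpre pr hpr))
  have hfoldB : (progresses.zip speeds).foldl (fun st pr => stepD st (dayB pr.1 pr.2)) ([], none)
      = ((progresses.zip speeds).map (fun pr => dayB pr.1 pr.2)).foldl stepD ([], none) := by
    rw [List.foldl_map]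
  rw [hmap, hfoldB]
  cases hds : (progresses.zip speeds).map (fun pr => dayB pr.1 pr.2) with
  | nil => rfl
  | cons h t =>
    -- A side: the index loop computes the prefix-maximum list h :: fixup h t
    have hlen : (((h :: t).length : Int)) = (([] : List Int).length : Int) + 1 + (t.length : Int) := by
      simp; omega
    have hfix : (PySem.List.pyRange 1 (((h :: t).length : Int)) 1).foldl stepFixA (h :: t)
        = h :: fixup h t := by
      rw [hlen]
      have := fixfold t [] h
      simpa using this
    rw [hfix]
    -- A side: Counter values over the nondecreasing list = run lengths
    have hvals : (PySem.Dict.counter (h :: fixup h t)).values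
        = List.map (fun k => (((h :: fixup h t).count k : Int) + if k = h then (0:Int) else 0))
            (PySem.Set.ofList (h :: fixup h t)) := by
      simp only [PySem.Dict.values, PySem.Dict.items_counter, List.map_map]
      apply List.map_congr_left
      intro k _
      simp
    rw [hvals, countmap (fixup h t) h 0 (pairwise_fixup t h), rle_fixup]
    -- B side: the fold produces the same batch sizes
    rw [List.foldl_cons, show stepD ([], none) h = ([], some (h, 1)) by rfl]
    have := foldD_some t [] h 1
    simp only [List.nil_append] at this
    rw [this]
    norm_num
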